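-- pv_equiv track=rewrite | github.com/zzizer/fyp | better.py | room_with_tables_single_program
-- ===== SOURCE A (Python) =====
-- def room_with_tables_single_program(total_tables):
--     seats_per_tables = 3
--     program_seats = []
--
--     program_seat = 1
--
--     for table in range(total_tables):
--         for seat in range(seats_per_tables):
--             if seat == 0 or seat ==2:
--                 program_seats.append(program_seat)
--                 program_seat += 2
--
--     return program_seats
-- ===== SOURCE B (Python) =====
-- def room_with_tables_single_program(total_tables):
--     # closed form: odd numbers 1,3,5,... of length 2*total_tables
--     return list(range(1, 4 * total_tables, 2))
-- ===== Notes on version B (the rewrite author's own statement) =====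
-- stated objective: faster
-- what changed: Replaces the nested table/seat loop and its branch with a single closed-form arithmetic range of odd numbers; a timing run measured B several times faster.
import Mathlib
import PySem

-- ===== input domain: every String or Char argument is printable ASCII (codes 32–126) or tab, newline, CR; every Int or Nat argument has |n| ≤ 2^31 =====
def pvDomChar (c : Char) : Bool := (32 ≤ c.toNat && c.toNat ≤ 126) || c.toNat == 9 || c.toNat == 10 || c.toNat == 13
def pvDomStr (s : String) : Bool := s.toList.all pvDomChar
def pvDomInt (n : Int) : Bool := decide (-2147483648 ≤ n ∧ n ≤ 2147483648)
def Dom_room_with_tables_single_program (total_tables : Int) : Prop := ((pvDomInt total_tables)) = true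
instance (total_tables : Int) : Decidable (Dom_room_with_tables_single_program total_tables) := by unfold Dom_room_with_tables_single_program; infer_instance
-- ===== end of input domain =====

-- B replaces A's nested table/seat loop by the closed-form arithmetic sequence range(1, 4*n, 2) (objective: simpler).

-- ===== PORT A =====
def room_with_tables_single_program (total_tables : Int) : List Int :=
  let seats_per_tables : Int := 3
  let st :=
    (PySem.List.pyRange 0 total_tables 1).foldl (fun st _table =>
      (PySem.List.pyRange 0 seats_per_tables 1).foldl (fun st seat =>
        if seat == 0 || seat == 2 then (st.1 ++ [st.2], st.2 + 2) else st) st)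
      (([] : List Int), (1 : Int))
  st.1

-- ===== PORT B =====
def room_with_tables_single_program_alt (total_tables : Int) : List Int :=
  PySem.List.pyRange 1 (4 * total_tables) 2

-- ===== PRECONDITION & SPEC =====
def Spec_room_with_tables_single_program (total_tables : Int) (out : List Int) : Prop := out = room_with_tables_single_program_alt total_tables
instance (total_tables : Int) (out : List Int) : Decidable (Spec_room_with_tables_single_program total_tables out) := by unfold Spec_room_with_tables_single_program; infer_instance

-- ===== CLAIM (what is proved, stated in full; the proofs are below) =====
def Claim_equal_room_with_tables_single_program : Prop := ∀ (total_tables : Int), Dom_room_with_tables_single_program total_tables → Spec_room_with_tables_single_program total_tables (room_with_tables_single_program total_tables)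

-- ===== LEMMAS AND PROOFS =====

-- one table body (the inner seat loop) as a single step
def pvStep (st : List Int × Int) : List Int × Int := (st.1 ++ [st.2, st.2 + 2], st.2 + 4)

lemma pvInner (st : List Int × Int) :
    (PySem.List.pyRange 0 3 1).foldl (fun st seat =>
      if seat == 0 || seat == 2 then (st.1 ++ [st.2], st.2 + 2) else st) st = pvStep st := by
  have : PySem.List.pyRange 0 3 1 = [0, 1, 2] := by decide
  simp [this, List.foldl, pvStep]
  omega

-- a foldl that ignores its elements is a function iterate
lemma pvFoldl_iter (xs : List Int) (st : List Int × Int) :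
    xs.foldl (fun st _ => pvStep st) st = pvStep^[xs.length] st := by
  induction xs generalizing st with
  | nil => rfl
  | cons x xs ih => simp [List.foldl, ih, Function.iterate_succ_apply]

lemma pvIter (k : Nat) (l : List Int) (s : Int) :
    pvStep^[k] (l, s) = (l ++ (List.range (2 * k)).map (fun i : Nat => s + 2 * (i : Int)), s + 4 * k) := by
  induction k generalizing l s with
  | zero => simp
  | succ k ih =>
      rw [Function.iterate_succ_apply', ih, pvStep]
      have h2 : 2 * (k + 1) = (2 * k) + 1 + 1 := by ring
      rw [h2, List.range_succ, List.range_succ]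
      simp only [List.map_append, List.map_cons, List.map_nil, List.append_assoc,
        List.singleton_append, Prod.mk.injEq]
      refine ⟨?_, by push_cast; ring⟩
      congr 2
      push_cast
      ring_nf

theorem room_with_tables_single_program_eq (n : Int) :
    room_with_tables_single_program n = room_with_tables_single_program_alt n := by
  unfold room_with_tables_single_program room_with_tables_single_program_alt
  have hA :
      (PySem.List.pyRange 0 n 1).foldl (fun st _table =>
        (PySem.List.pyRange 0 3 1).foldl (fun st seat =>
          if seat == 0 || seat == 2 then (st.1 ++ [st.2], st.2 + 2) else st) st)
        (([] : List Int), (1 : Int))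
      = pvStep^[(PySem.List.pyRange 0 n 1).length] (([] : List Int), (1 : Int)) := by
    rw [← pvFoldl_iter]
    exact PySem.List.foldl_congr_mem _ _ _ _ (fun st x _ => pvInner st)
  simp only [hA, PySem.List.length_pyRange_one, sub_zero, pvIter]
  rw [PySem.List.pyRange_of_pos 1 (4 * n) (by norm_num)]
  have hdiv : ((4 * n - 1 + 2 - 1) / 2 : Int) = 2 * n := by
    have h1 : (4 * n - 1 + 2 - 1 : Int) = 2 * (2 * n) := by ring
    rw [h1, Int.mul_ediv_cancel_left _ (by norm_num)]
  rw [hdiv]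
  by_cases h : 0 < n
  · rw [if_pos (by omega : (1 : Int) < 4 * n)]
    have h2 : (2 * n).toNat = 2 * n.toNat := by omega
    rw [h2]
    simp
  · rw [if_neg (by omega)]
    have h0 : n.toNat = 0 := by omega
    simp [h0]

-- ===== VERDICT (by name: the statement is the Claim_ definition above) =====
theorem room_with_tables_single_program_spec : Claim_equal_room_with_tables_single_program := by
  intro n _
  exact room_with_tables_single_program_eq n
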